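-- pv_equiv track=rewrite | github.com/khanhduy2908/PD_sentiment-and-financial | core/data_access.py | _guess_header_and_sep
-- ===== SOURCE A (Python) =====
-- from typing import List, Optional, Tuple, Dict, Any
--
-- def _guess_header_and_sep(lines: List[str]) -> Tuple[int, str]:
--     """
--     Chọn dòng header hợp lệ đầu tiên + delimiter tối ưu.
--     Tiêu chí: dòng có ≥3 cột và chứa ít nhất 1 ký tự chữ cái.
--     Ưu tiên dòng có 'ticker'/'mã'/'symbol' trong text.
--     """
--     def is_header_like(cells: List[str]) -> bool:
--         if len(cells) < 3:
--             return False
--         text = " ".join(cells).lower()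
--         return any(ch.isalpha() for ch in text)
--
--     # 1) Ưu tiên dòng có 'ticker'/'mã'/'symbol'
--     for i, ln in enumerate(lines[:300]):
--         for sep in [",", ";", "\t"]:
--             cells = [c.strip() for c in ln.split(sep)]
--             if is_header_like(cells):
--                 joined = " ".join(cells).lower()
--                 if any(k in joined for k in ("ticker", "mã", "ma ", "symbol")):
--                     return i, sep
--
--     # 2) Chọn dòng có nhiều cột nhất
--     best = (-1, ",", 0)
--     for i, ln in enumerate(lines[:300]):
--         for sep in [",", ";", "\t"]:
--             n = len(ln.split(sep))
--             if n > best[2]: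
--                 best = (i, sep, n)
--     if best[0] >= 0 and best[2] >= 3:
--         return best[0], best[1]
--
--     return 0, ","  # fallback
-- ===== SOURCE B (Python) =====
-- from typing import List, Tuple
--
-- def _keyword_hit(cells: List[str]) -> bool:
--     # header-like (>=3 cells, contains a letter) AND carries a ticker keyword
--     if len(cells) >= 3:
--         joined = " ".join(cells).lower()
--         return (any(ch.isalpha() for ch in joined)
--                 and any(k in joined for k in ("ticker", "mã", "ma ", "symbol")))
--     return False
--
-- def _guess_header_and_sep(lines: List[str]) -> Tuple[int, str]:
--     # Single pass: return at the first keyword header; otherwise keep the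
--     # widest-split (first-wins, strict >) candidate and fall back to it.
--     best = (-1, ",", 0)
--     for i, ln in enumerate(lines[:300]):
--         for sep in (",", ";", "\t"):
--             raw = ln.split(sep)
--             if _keyword_hit([c.strip() for c in raw]):
--                 return i, sep
--             if len(raw) > best[2]:
--                 best = (i, sep, len(raw))
--     if best[0] >= 0 and best[2] >= 3:
--         return best[0], best[1]
--     return 0, ","
-- ===== Notes on version B (the rewrite author's own statement) =====
-- stated objective: simpler
-- what changed: A's two sequential scans over lines[:300] are merged into a single pass that returns immediately at the first keyword header while simultaneously maintaining the widest-split fallback candidate.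
import Mathlib
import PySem

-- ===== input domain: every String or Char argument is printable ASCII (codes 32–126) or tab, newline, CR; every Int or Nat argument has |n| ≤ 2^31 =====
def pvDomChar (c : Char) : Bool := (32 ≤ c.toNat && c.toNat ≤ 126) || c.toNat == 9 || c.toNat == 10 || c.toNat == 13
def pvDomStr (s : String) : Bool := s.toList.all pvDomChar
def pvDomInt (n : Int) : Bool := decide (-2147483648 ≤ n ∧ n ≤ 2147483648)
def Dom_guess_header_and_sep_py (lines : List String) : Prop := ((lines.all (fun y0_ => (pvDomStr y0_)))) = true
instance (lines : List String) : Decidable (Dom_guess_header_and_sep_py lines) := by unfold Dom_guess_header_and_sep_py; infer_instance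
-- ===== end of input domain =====

-- B merges A's two sequential scans into one pass that returns on the first keyword
-- header and otherwise maintains the widest-split candidate (objective: simpler, one pass).

-- ===== PORT A =====
-- ln.split(sep): every sep used below is a nonempty literal, so split? is always `some` (exact)
def pvSplit (ln sep : String) : List String := (PySem.Str.split? ln sep).getD []

def pvSeps : List String := [",", ";", "\t"]

def pvKeywords : List String := ["ticker", "mã", "ma ", "symbol"]

-- is_header_like(cells)
def pvIsHeaderLike (cells : List String) : Bool :=
  if cells.length < 3 then false
  else (PySem.Str.lower (PySem.Str.join " " cells)).toList.any PySem.Chars.isalpha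

-- any(k in joined for k in (...)) with joined = " ".join(cells).lower()
def pvHasKeyword (cells : List String) : Bool :=
  let joined := PySem.Str.lower (PySem.Str.join " " cells)
  pvKeywords.any (fun k => PySem.Str.isIn k joined)

-- pass 1, inner loop over seps for one line
def pvTrySepsA (i : Int) (ln : String) : List String → Option (Int × String)
  | [] => none
  | sep :: rest =>
    let cells := (pvSplit ln sep).map PySem.Str.strip
    if pvIsHeaderLike cells && pvHasKeyword cells then some (i, sep)
    else pvTrySepsA i ln rest

-- pass 1, loop over enumerated lines
def pvScan1 : Int → List String → Option (Int × String)
  | _, [] => none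
  | i, ln :: rest =>
    match pvTrySepsA i ln pvSeps with
    | some r => some r
    | none => pvScan1 (i + 1) rest

-- pass 2, inner loop over seps for one line, updating best = (i, sep, n)
def pvUpdSeps (i : Int) (ln : String) : List String → (Int × String × Int) → (Int × String × Int)
  | [], best => best
  | sep :: rest, best =>
    let n : Int := (pvSplit ln sep).length
    pvUpdSeps i ln rest (if n > best.2.2 then (i, sep, n) else best)

-- pass 2, loop over enumerated lines
def pvScan2 : Int → List String → (Int × String × Int) → (Int × String × Int)
  | _, [], best => best
  | i, ln :: rest, best => pvScan2 (i + 1) rest (pvUpdSeps i ln pvSeps best)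

-- "if best[0] >= 0 and best[2] >= 3: return best[0], best[1]; return 0, ','"
def pvFinal (best : Int × String × Int) : Int × String :=
  if best.1 ≥ 0 ∧ best.2.2 ≥ 3 then (best.1, best.2.1) else (0, ",")

def guess_header_and_sep_py (lines : List String) : Int × String :=
  match pvScan1 0 (lines.take 300) with   -- lines[:300] (300 ≥ 0, so take is exact)
  | some r => r
  | none => pvFinal (pvScan2 0 (lines.take 300) (-1, ",", 0))

-- ===== PORT B =====
-- _keyword_hit(cells)
def pvKeywordHit (cells : List String) : Bool :=
  if cells.length ≥ 3 then
    let joined := PySem.Str.lower (PySem.Str.join " " cells)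
    joined.toList.any PySem.Chars.isalpha
      && pvKeywords.any (fun k => PySem.Str.isIn k joined)
  else false

-- single pass, inner loop over seps: either an early return (inl) or the updated best (inr)
def pvLineB (i : Int) (ln : String) : List String → (Int × String × Int) → Sum (Int × String) (Int × String × Int)
  | [], best => .inr best
  | sep :: rest, best =>
    let raw := pvSplit ln sep
    if pvKeywordHit (raw.map PySem.Str.strip) then .inl (i, sep)
    else pvLineB i ln rest (if (raw.length : Int) > best.2.2 then (i, sep, (raw.length : Int)) else best)

def pvLoopB : Int → List String → (Int × String × Int) → Int × String
  | _, [], best => pvFinal best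
  | i, ln :: rest, best =>
    match pvLineB i ln pvSeps best with
    | .inl r => r
    | .inr best' => pvLoopB (i + 1) rest best'

def guess_header_and_sep_py_alt (lines : List String) : Int × String :=
  pvLoopB 0 (lines.take 300) (-1, ",", 0)

-- ===== PRECONDITION & SPEC =====
def Spec_guess_header_and_sep_py (lines : List String) (out : Int × String) : Prop := out = guess_header_and_sep_py_alt lines
instance (lines : List String) (out : Int × String) : Decidable (Spec_guess_header_and_sep_py lines out) := by unfold Spec_guess_header_and_sep_py; infer_instance

-- ===== CLAIM (what is proved, stated in full; the proofs are below) =====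
def Claim_equal_guess_header_and_sep_py : Prop := ∀ (lines : List String), Dom_guess_header_and_sep_py lines → Spec_guess_header_and_sep_py lines (guess_header_and_sep_py lines)

-- ===== LEMMAS AND PROOFS =====

-- B's combined test equals A's two tests
theorem keywordHit_eq (cells : List String) :
    pvKeywordHit cells = (pvIsHeaderLike cells && pvHasKeyword cells) := by
  unfold pvKeywordHit pvIsHeaderLike pvHasKeyword
  by_cases h : cells.length < 3
  · simp [h, show ¬ cells.length ≥ 3 by omega]
  · simp [h, show cells.length ≥ 3 by omega]

-- one line of B's inner loop = A's pass-1 inner loop, falling through to A's pass-2 update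
theorem lineB_eq (i : Int) (ln : String) (ss : List String) (best : Int × String × Int) :
    pvLineB i ln ss best =
      match pvTrySepsA i ln ss with
      | some r => Sum.inl r
      | none => Sum.inr (pvUpdSeps i ln ss best) := by
  induction ss generalizing best with
  | nil => simp [pvLineB, pvTrySepsA, pvUpdSeps]
  | cons sep rest ih =>
    simp only [pvLineB, pvTrySepsA, pvUpdSeps, keywordHit_eq]
    by_cases h : (pvIsHeaderLike ((pvSplit ln sep).map PySem.Str.strip)
        && pvHasKeyword ((pvSplit ln sep).map PySem.Str.strip)) = true
    · simp [h]
    · simp only [Bool.not_eq_true] at h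
      simp [h, ih]

-- B's single loop = A's pass 1, then A's pass 2 from the carried best
theorem loopB_eq (L : List String) : ∀ (i : Int) (best : Int × String × Int),
    pvLoopB i L best =
      match pvScan1 i L with
      | some r => r
      | none => pvFinal (pvScan2 i L best) := by
  induction L with
  | nil => intro i best; rfl
  | cons ln rest ih =>
    intro i best
    simp only [pvLoopB, pvScan1, pvScan2, lineB_eq]
    cases h : pvTrySepsA i ln pvSeps with
    | some r => rfl
    | none => simp [ih]

-- ===== VERDICT (by name: the statement is the Claim_ definition above) =====
theorem guess_header_and_sep_py_spec : Claim_equal_guess_header_and_sep_py := by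
  intro lines _
  unfold Spec_guess_header_and_sep_py guess_header_and_sep_py guess_header_and_sep_py_alt
  rw [loopB_eq]
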